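-- pv_equiv track=rewrite | github.com/dna001/advofcode2020 | 7/7.py | get_bags
-- ===== SOURCE A (Python) =====
-- def get_bags(rules, bags):
--     """Find bags in rules."""
--     found = {}
--     for key, value in rules.items():
--         if value:
--             for bag in bags.keys():
--                 if bag in value.keys():
--                     found[key] = 1
--
--     # Remove found keys from rules
--     for key in found.keys():
--         del rules[key]
--
--     return found
-- ===== SOURCE B (Python) =====
-- def get_bags(rules, bags):
--     """Find bags in rules."""
--     # Build an inverted index: bag name -> list of rule keys whose value mentions it.
--     index = {}
--     for key, value in rules.items():
--         for bag in value.keys():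
--             index.setdefault(bag, []).append(key)
--     # Query-driven pass: collect the hit rule keys from the index.
--     hit = set()
--     for bag in bags.keys():
--         hit.update(index.get(bag, []))
--     found = {key: 1 for key in rules.keys() if key in hit}
--     # Remove found keys from rules
--     for key in found.keys():
--         del rules[key]
--     return found
-- ===== Notes on version B (the rewrite author's own statement) =====
-- stated objective: faster
-- what changed: B replaces A's per-rule rescanning of all queried bags by an inverted index (bag -> rule keys) built in one pass, a query-driven hit set, and a final dict comprehension over the rule keys, turning the O(|rules|*|bags|) double loop into near-linear work; equivalence is about the return value (both delete found keys from rules).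
import Mathlib
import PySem

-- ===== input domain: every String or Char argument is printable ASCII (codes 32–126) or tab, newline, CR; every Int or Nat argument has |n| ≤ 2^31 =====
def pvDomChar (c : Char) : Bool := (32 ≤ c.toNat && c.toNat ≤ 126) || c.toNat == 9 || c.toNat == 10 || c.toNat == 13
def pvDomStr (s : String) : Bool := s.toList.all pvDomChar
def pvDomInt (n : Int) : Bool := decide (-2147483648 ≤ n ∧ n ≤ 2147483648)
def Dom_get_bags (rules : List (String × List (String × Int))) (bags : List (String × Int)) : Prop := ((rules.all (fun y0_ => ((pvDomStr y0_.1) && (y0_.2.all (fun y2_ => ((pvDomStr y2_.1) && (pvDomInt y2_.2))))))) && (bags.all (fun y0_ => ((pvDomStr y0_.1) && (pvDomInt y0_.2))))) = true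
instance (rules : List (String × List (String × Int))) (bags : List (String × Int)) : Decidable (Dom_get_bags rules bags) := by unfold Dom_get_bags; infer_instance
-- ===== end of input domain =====

-- B replaces A's per-rule rescan of the queried bags by an inverted index plus a
-- query-driven hit set (alternative decomposition; equivalence is about the RETURN
-- value — both Pythons also delete the found keys from the rules dict in place).


-- ===== PORT A =====
-- for key, value in rules.items(): if value: for bag in bags.keys(): if bag in value.keys(): found[key] = 1
def get_bags (rules : List (String × List (String × Int))) (bags : List (String × Int)) : List (String × Int) :=
  let found : PySem.Dict String Int :=
    rules.foldl (fun found kv =>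
      if kv.2 ≠ [] then
        bags.foldl (fun found b =>
          if kv.2.any (fun p => p.1 == b.1) then found.insert kv.1 1 else found) found
      else found) PySem.Dict.empty
  found.items

-- ===== PORT B =====
-- index = {}; for key, value in rules: for bag in value: index.setdefault(bag, []).append(key)
-- hit = set(); for bag in bags: hit.update(index.get(bag, []))
-- found = {key: 1 for key in rules if key in hit}
def get_bags_alt (rules : List (String × List (String × Int))) (bags : List (String × Int)) : List (String × Int) :=
  let index : PySem.Dict String (List String) :=
    rules.foldl (fun ix kv =>
      kv.2.foldl (fun ix p => ix.modify p.1 [] (· ++ [kv.1])) ix) PySem.Dict.empty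
  let hit : PySem.Set String :=
    bags.foldl (fun s b => PySem.Set.update s (index.getD b.1 [])) PySem.Set.empty
  let found : PySem.Dict String Int :=
    rules.foldl (fun d kv => if hit.contains kv.1 then d.insert kv.1 1 else d) PySem.Dict.empty
  found.items

-- ===== PRECONDITION & SPEC =====
-- Pre_ excludes rule lists with duplicate keys: they do not arise from a Python dict
-- (the caller's dict collapses them), and the ports' insertion order on them is accidental.
def Pre_get_bags (rules : List (String × List (String × Int))) (bags : List (String × Int)) : Prop :=
  (rules.map Prod.fst).Nodup
instance (rules : List (String × List (String × Int))) (bags : List (String × Int)) : Decidable (Pre_get_bags rules bags) := by unfold Pre_get_bags; infer_instance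
def pvWitness_get_bags : (List (String × List (String × Int))) × (List (String × Int)) :=
  ([("a", [("x", 1)]), ("b", [])], [("x", 2)])
def Spec_get_bags (rules : List (String × List (String × Int))) (bags : List (String × Int)) (out : List (String × Int)) : Prop := out = get_bags_alt rules bags
instance (rules : List (String × List (String × Int))) (bags : List (String × Int)) (out : List (String × Int)) : Decidable (Spec_get_bags rules bags out) := by unfold Spec_get_bags; infer_instance

-- ===== CLAIM (what is proved, stated in full; the proofs are below) =====
def Claim_equal_get_bags : Prop := ∀ (rules : List (String × List (String × Int))) (bags : List (String × Int)), Dom_get_bags rules bags → Pre_get_bags rules bags → Spec_get_bags rules bags (get_bags rules bags)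

-- ===== LEMMAS AND PROOFS =====

-- A's inner loop over the bags: insert once iff some queried bag is a key of v.
lemma inner_fold_eq (bags : List (String × Int)) (v : List (String × Int)) (k : String)
    (f : PySem.Dict String Int) :
    bags.foldl (fun f b => if v.any (fun p => p.1 == b.1) then f.insert k 1 else f) f =
      if bags.any (fun b => v.any (fun p => p.1 == b.1)) then f.insert k 1 else f := by
  induction bags generalizing f with
  | nil => simp
  | cons b rest ih =>
    simp only [List.foldl_cons, List.any_cons]
    by_cases h : v.any (fun p => p.1 == b.1)
    · simp [h, ih, PySem.Dict.insert_insert_self]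
    · rw [if_neg h, ih]
      simp only [eq_false_of_ne_true h, Bool.false_or]

-- A's whole loop, normalised: one conditional insert per rule.
lemma a_norm (rules : List (String × List (String × Int))) (bags : List (String × Int)) :
    get_bags rules bags =
      (rules.foldl (fun f kv =>
        if bags.any (fun b => kv.2.any (fun p => p.1 == b.1)) then f.insert kv.1 1 else f)
        PySem.Dict.empty).items := by
  unfold get_bags
  dsimp only
  congr 1
  apply PySem.List.foldl_congr_mem
  intro f kv _
  rw [inner_fold_eq]
  by_cases hv : kv.2 = [] <;> simp [hv]

-- B's inverted index, characterised: index[b] collects, in rule order, the keys of the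
-- rules whose value mentions bag b.
lemma index_getD (rs : List (String × List (String × Int)))
    (d : PySem.Dict String (List String)) (b : String) :
    (rs.foldl (fun ix kv => kv.2.foldl (fun ix p => ix.modify p.1 [] (· ++ [kv.1])) ix) d).getD b [] =
      d.getD b [] ++ rs.flatMap (fun kv =>
        ((kv.2.map (fun p => (p.1, kv.1))).filter (fun q => q.1 == b)).map Prod.snd) := by
  induction rs generalizing d with
  | nil => simp
  | cons kv rest ih =>
    rw [List.foldl_cons, ih]
    have h2 : kv.2.foldl (fun ix p => ix.modify p.1 [] (· ++ [kv.1])) d =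
        (kv.2.map (fun p => (p.1, kv.1))).foldl (fun d q => d.modify q.1 [] (· ++ [q.2])) d := by
      rw [List.foldl_map]
    rw [h2, PySem.Dict.getD_foldl_modify_append]
    simp [List.flatMap_cons, List.append_assoc]

-- B's hit set: membership after the whole bags loop.
lemma hit_mem (g : String × Int → List String) (bs : List (String × Int))
    (s : PySem.Set String) (k : String) :
    k ∈ bs.foldl (fun s b => PySem.Set.update s (g b)) s ↔ k ∈ s ∨ ∃ b ∈ bs, k ∈ g b := by
  induction bs generalizing s with
  | nil => simp
  | cons b rest ih =>
    rw [List.foldl_cons, ih]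
    simp [PySem.Set.mem_update]
    tauto

-- On a duplicate-free rule list, B's hit test agrees rule-by-rule with A's bag scan.
lemma hit_eq_scan (rules : List (String × List (String × Int))) (bags : List (String × Int))
    (hpre : (rules.map Prod.fst).Nodup) (kv : String × List (String × Int)) (hkv : kv ∈ rules) :
    (PySem.Set.contains
      (bags.foldl (fun s b => PySem.Set.update s
        ((rules.foldl (fun ix kv => kv.2.foldl (fun ix p => ix.modify p.1 [] (· ++ [kv.1])) ix)
          PySem.Dict.empty).getD b.1 [])) PySem.Set.empty) kv.1) =
      bags.any (fun b => kv.2.any (fun p => p.1 == b.1)) := by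
  apply Bool.coe_iff_coe.mp
  rw [PySem.Set.contains_iff, hit_mem, List.any_eq_true]
  constructor
  · rintro (h | ⟨b, hb, hk⟩)
    · simp at h
    · rw [index_getD] at hk
      simp only [PySem.Dict.getD_empty, List.nil_append, List.mem_flatMap, List.mem_map,
        List.mem_filter] at hk
      obtain ⟨kv', hkv', q, ⟨⟨p, hp, rfl⟩, hq⟩, hsnd⟩ := hk
      have : kv' = kv := List.inj_on_of_nodup_map hpre hkv' hkv hsnd
      subst this
      exact ⟨b, hb, List.any_eq_true.mpr ⟨p, hp, hq⟩⟩
  · rintro ⟨b, hb, hany⟩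
    obtain ⟨p, hp, hpb⟩ := List.any_eq_true.mp hany
    refine Or.inr ⟨b, hb, ?_⟩
    rw [index_getD]
    simp only [PySem.Dict.getD_empty, List.nil_append, List.mem_flatMap, List.mem_map,
      List.mem_filter]
    exact ⟨kv, hkv, (p.1, kv.1), ⟨⟨p, hp, rfl⟩, hpb⟩, rfl⟩

-- ===== VERDICT (by name: the statement is the Claim_ definition above) =====
theorem get_bags_spec : Claim_equal_get_bags := by
  intro rules bags _ hpre
  unfold Spec_get_bags
  rw [a_norm]
  unfold get_bags_alt
  dsimp only
  congr 1
  apply PySem.List.foldl_congr_mem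
  intro f kv hkv
  rw [hit_eq_scan rules bags hpre kv hkv]
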